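-- pv_equiv track=rewrite | github.com/LeBronLiHD/ZJU2021_TuanBigData_CourseProject | data_process.py | transfer_65536
-- ===== SOURCE A (Python) =====
-- def transfer_65536(data):
--     for i in range(len(data)):
--         for j in range(len(data[i])):
--             for k in range(len(data[i][j])):
--                 for m in range(len(data[i][j][k])):
--                     if data[i][j][k][m] > 32768:
--                         data[i][j][k][m] -= 65536
--     return data
-- ===== SOURCE B (Python) =====
-- def transfer_65536(data):
--     # Stage 1: record the shape (row lengths) and flatten all ints into one list.
--     flat = []
--     shape = []
--     for cube in data:
--         s_cube = []
--         for plane in cube: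
--             s_plane = []
--             for row in plane:
--                 s_plane.append(len(row))
--                 flat.extend(row)
--             s_cube.append(s_plane)
--         shape.append(s_cube)
--     # Stage 2: one linear pass fixes the wrapped values.
--     fixed = [x - 65536 if x > 32768 else x for x in flat]
--     # Stage 3: rebuild the 4-D structure by slicing the flat result along the shape.
--     out = []
--     pos = 0
--     for s_cube in shape:
--         cube = []
--         for s_plane in s_cube:
--             plane = []
--             for n in s_plane:
--                 plane.append(fixed[pos:pos + n])
--                 pos += n
--             cube.append(plane)
--         out.append(cube)
--     return out
-- ===== Notes on version B (the rewrite author's own statement) =====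
-- stated objective: alternative
-- what changed: Replaces the four nested in-place index loops with a staged pipeline: flatten all ints into one list while recording the row-length shape, fix the wrapped values in a single linear pass, then rebuild the 4-D nesting by slicing the flat result along the recorded shape (return value only: A mutates its argument in place, B does not).
import Mathlib
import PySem

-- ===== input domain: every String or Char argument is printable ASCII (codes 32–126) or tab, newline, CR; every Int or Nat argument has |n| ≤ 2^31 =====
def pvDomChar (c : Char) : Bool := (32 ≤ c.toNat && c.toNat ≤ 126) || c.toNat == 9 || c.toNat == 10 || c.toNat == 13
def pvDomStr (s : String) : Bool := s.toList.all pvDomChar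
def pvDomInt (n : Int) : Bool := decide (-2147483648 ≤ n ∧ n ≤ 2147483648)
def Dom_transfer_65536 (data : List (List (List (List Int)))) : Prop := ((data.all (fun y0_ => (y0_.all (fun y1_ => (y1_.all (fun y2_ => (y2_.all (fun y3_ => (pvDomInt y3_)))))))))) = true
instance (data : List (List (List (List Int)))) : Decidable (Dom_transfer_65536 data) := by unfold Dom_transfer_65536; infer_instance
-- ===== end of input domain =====

-- B replaces A's four nested in-place index loops by a staged flatten / one-pass fix /
-- shape-driven rebuild (alternative decomposition); equivalence is about the RETURN value
-- only: A mutates its argument in place, B does not.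

-- ===== PORT A =====
-- Python A mutates `data` in place through four nested index loops; each loop is ported as a
-- foldl over range(len(...)) whose state is the (sub)list being mutated, an in-place update of
-- element i becoming `set i`.
def transfer_65536 (data : List (List (List (List Int)))) : List (List (List (List Int))) :=
  (List.range data.length).foldl (fun d i =>
    d.set i ((List.range (d.getD i []).length).foldl (fun p j =>
      p.set j ((List.range (p.getD j []).length).foldl (fun q k =>
        q.set k ((List.range (q.getD k []).length).foldl (fun r m =>
          if r.getD m 0 > 32768 then r.set m (r.getD m 0 - 65536) else r)
          (q.getD k [])))
        (p.getD j [])))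
      (d.getD i []))) data

-- ===== PORT B =====
-- Stage 1 (flatten + shape), stage 2 (one map pass), stage 3 (rebuild by slicing), exactly as
-- in Source B; each Python for-loop body is the named fold step below (`flat.extend(row)` /
-- `s_plane.append(len(row))` are appends on the state; `fixed[pos:pos+n]` is PySem.List.slice).
def pvBFlatRow (acc3 : List Int × List Int) (row : List Int) : List Int × List Int :=
  (acc3.1 ++ row, acc3.2 ++ [(row.length : Int)])
def pvBFlatPlane (acc2 : List Int × List (List Int)) (plane : List (List Int)) :
    List Int × List (List Int) :=
  let ps := plane.foldl pvBFlatRow (acc2.1, [])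
  (ps.1, acc2.2 ++ [ps.2])
def pvBFlatCube (acc : List Int × List (List (List Int))) (cube : List (List (List Int))) :
    List Int × List (List (List Int)) :=
  let cs := cube.foldl pvBFlatPlane (acc.1, [])
  (cs.1, acc.2 ++ [cs.2])
def pvBSliceRow (F : List Int) (st3 : List (List Int) × Int) (n : Int) :
    List (List Int) × Int :=
  (st3.1 ++ [PySem.List.slice F (some st3.2) (some (st3.2 + n))], st3.2 + n)
def pvBBuildPlane (F : List Int) (st2 : List (List (List Int)) × Int) (sPlane : List Int) :
    List (List (List Int)) × Int :=
  let rp := sPlane.foldl (pvBSliceRow F) ([], st2.2)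
  (st2.1 ++ [rp.1], rp.2)
def pvBBuildCube (F : List Int) (st : List (List (List (List Int))) × Int)
    (sCube : List (List Int)) : List (List (List (List Int))) × Int :=
  let rc := sCube.foldl (pvBBuildPlane F) ([], st.2)
  (st.1 ++ [rc.1], rc.2)

def transfer_65536_alt (data : List (List (List (List Int)))) : List (List (List (List Int))) :=
  let fs := data.foldl pvBFlatCube ([], [])
  let fixed := fs.1.map (fun x => if x > 32768 then x - 65536 else x)
  (fs.2.foldl (pvBBuildCube fixed) ([], 0)).1

-- ===== PRECONDITION & SPEC =====
def Spec_transfer_65536 (data : List (List (List (List Int)))) (out : List (List (List (List Int)))) : Prop := out = transfer_65536_alt data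
instance (data : List (List (List (List Int)))) (out : List (List (List (List Int)))) : Decidable (Spec_transfer_65536 data out) := by unfold Spec_transfer_65536; infer_instance

-- ===== CLAIM (what is proved, stated in full; the proofs are below) =====
def Claim_equal_transfer_65536 : Prop := ∀ (data : List (List (List (List Int)))), Dom_transfer_65536 data → Spec_transfer_65536 data (transfer_65536 data)

-- ===== LEMMAS AND PROOFS =====

-- the elementwise fix both programs apply
def pvFix (x : Int) : Int := if x > 32768 then x - 65536 else x

-- ---------- A-side: the four index loops are List.map at each level ----------

-- `set` at the junction of an append, writing a function of the value currently there.
theorem pv_set_mid {α : Type} (a : List α) (x : α) (c : List α) (g : α → α) (d : α) :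
    (a ++ x :: c).set a.length (g ((a ++ x :: c).getD a.length d)) = a ++ g x :: c := by
  have h1 : (a ++ x :: c).getD a.length d = x := by
    simp [List.getD]
  rw [h1, List.set_append_right _ _ (le_refl _)]
  simp

-- Updating each index of a list (via range(len)) with a function of its current value is List.map.
theorem pv_foldl_set_range {α : Type} (g : α → α) (d : α) (l : List α) :
    ∀ n, n ≤ l.length →
      (List.range n).foldl (fun acc m => acc.set m (g (acc.getD m d))) l
        = (l.take n).map g ++ l.drop n := by
  intro n
  induction n with
  | zero => intro _; simp
  | succ n ih =>
    intro hn
    have hn' : n < l.length := hn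
    rw [List.range_succ, List.foldl_append, ih (Nat.le_of_lt hn')]
    simp only [List.foldl_cons, List.foldl_nil]
    have hx : l[n]? = some l[n] := List.getElem?_eq_getElem hn'
    generalize hv : l[n] = x at hx
    have hdrop : l.drop n = x :: l.drop (n + 1) := by
      rw [List.drop_eq_getElem_cons hn', hv]
    have hlen : ((l.take n).map g).length = n := by
      simp [Nat.le_of_lt hn']
    rw [hdrop]
    have hmid := pv_set_mid ((l.take n).map g) x (l.drop (n + 1)) g d
    rw [hlen] at hmid
    rw [hmid, List.take_add_one, hx]
    simp

-- A's innermost step (read, test, conditionally write back) is an unconditional `set` of pvFix.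
theorem pv_inner_step (r : List Int) (m : Nat) :
    (if r.getD m 0 > 32768 then r.set m (r.getD m 0 - 65536) else r)
      = r.set m (pvFix (r.getD m 0)) := by
  unfold pvFix
  by_cases hc : r.getD m 0 > 32768
  · simp only [if_pos hc]
  · simp only [if_neg hc]
    by_cases hm : m < r.length
    · have hgd : r.getD m 0 = r[m] := by simp [List.getD, List.getElem?_eq_getElem hm]
      rw [hgd]
      exact (List.set_getElem_self hm).symm
    · exact (List.set_eq_of_length_le (Nat.le_of_not_lt hm)).symm

-- Any step extensionally of the read-modify-write shape folds to List.map.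
theorem pv_foldl_step_map {α : Type} (step : List α → Nat → List α) (g : α → α) (d : α)
    (hstep : ∀ acc m, step acc m = acc.set m (g (acc.getD m d))) (l : List α) :
    (List.range l.length).foldl step l = l.map g := by
  have hs : step = fun acc m => acc.set m (g (acc.getD m d)) :=
    funext fun a => funext fun m => hstep a m
  rw [hs, pv_foldl_set_range g d l l.length (le_refl _)]
  simp

theorem pv_A_map (data : List (List (List (List Int)))) :
    transfer_65536 data
      = data.map (fun c => c.map (fun p => p.map (fun r => r.map pvFix))) := by
  unfold transfer_65536
  have h4 : ∀ r : List Int,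
      (List.range r.length).foldl (fun r m =>
          if r.getD m 0 > 32768 then r.set m (r.getD m 0 - 65536) else r) r
        = r.map pvFix :=
    fun r => pv_foldl_step_map _ _ 0 pv_inner_step r
  have h3 : ∀ q : List (List Int),
      (List.range q.length).foldl (fun q k =>
          q.set k ((List.range (q.getD k []).length).foldl (fun r m =>
            if r.getD m 0 > 32768 then r.set m (r.getD m 0 - 65536) else r) (q.getD k []))) q
        = q.map (fun r => r.map pvFix) :=
    fun q => pv_foldl_step_map _ _ [] (fun acc k => by simp only [h4]) q
  have h2 : ∀ p : List (List (List Int)),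
      (List.range p.length).foldl (fun p j =>
          p.set j ((List.range (p.getD j []).length).foldl (fun q k =>
            q.set k ((List.range (q.getD k []).length).foldl (fun r m =>
              if r.getD m 0 > 32768 then r.set m (r.getD m 0 - 65536) else r) (q.getD k [])))
            (p.getD j []))) p
        = p.map (fun q => q.map (fun r => r.map pvFix)) :=
    fun p => pv_foldl_step_map _ _ [] (fun acc j => by simp only [h3]) p
  exact pv_foldl_step_map _ _ [] (fun acc i => by simp only [h2]) data

-- ---------- B-side stage 1: the flatten/shape fold computes flatten³ and the length shape ----------

theorem pv_b1_plane (plane : List (List Int)) :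
    ∀ (fl : List Int) (s : List Int),
      plane.foldl pvBFlatRow (fl, s)
        = (fl ++ plane.flatten, s ++ plane.map (fun row => (row.length : Int))) := by
  induction plane with
  | nil => intro fl s; simp
  | cons r t ih =>
    intro fl s
    rw [List.foldl_cons]
    show t.foldl pvBFlatRow (fl ++ r, s ++ [(r.length : Int)]) = _
    rw [ih]
    simp

theorem pv_b1_cube (cube : List (List (List Int))) :
    ∀ (fl : List Int) (s : List (List Int)),
      cube.foldl pvBFlatPlane (fl, s)
        = (fl ++ cube.flatten.flatten,
           s ++ cube.map (fun plane => plane.map (fun row => (row.length : Int)))) := by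
  induction cube with
  | nil => intro fl s; simp
  | cons p t ih =>
    intro fl s
    rw [List.foldl_cons]
    show t.foldl pvBFlatPlane (pvBFlatPlane (fl, s) p) = _
    rw [show pvBFlatPlane (fl, s) p
          = (fl ++ p.flatten, s ++ [p.map (fun row => (row.length : Int))]) by
        unfold pvBFlatPlane; rw [pv_b1_plane]; simp]
    rw [ih]
    simp

theorem pv_b1_data (data : List (List (List (List Int)))) :
    ∀ (fl : List Int) (s : List (List (List Int))),
      data.foldl pvBFlatCube (fl, s)
        = (fl ++ data.flatten.flatten.flatten,
           s ++ data.map (fun cube => cube.map (fun plane =>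
                 plane.map (fun row => (row.length : Int))))) := by
  induction data with
  | nil => intro fl s; simp
  | cons c t ih =>
    intro fl s
    rw [List.foldl_cons]
    show t.foldl pvBFlatCube (pvBFlatCube (fl, s) c) = _
    rw [show pvBFlatCube (fl, s) c
          = (fl ++ c.flatten.flatten,
             s ++ [c.map (fun plane => plane.map (fun row => (row.length : Int)))]) by
        unfold pvBFlatCube; rw [pv_b1_cube]; simp]
    rw [ih]
    simp

-- ---------- B-side stage 3: slicing along the shape reconstructs the nesting ----------

-- Slicing `[pos:pos+len(row)]` at the consumed-prefix position yields exactly `row`.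
theorem pv_slice_row (F row rest : List Int) (p : Nat) (h : F.drop p = row ++ rest) :
    PySem.List.slice F (some (p : Int)) (some ((p : Int) + (row.length : Int))) = row := by
  rw [PySem.List.slice_natCast_add, h]
  simp

theorem pv_b3_plane (F : List Int) (Q : List (List Int)) :
    ∀ (p : Nat) (acc : List (List Int)) (rest : List Int),
      F.drop p = Q.flatten ++ rest →
      (Q.map (fun r => (r.length : Int))).foldl (pvBSliceRow F) (acc, (p : Int))
        = (acc ++ Q, ((p + Q.flatten.length : Nat) : Int)) := by
  induction Q with
  | nil => intro p acc rest h; simp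
  | cons r t ih =>
    intro p acc rest h
    simp only [List.flatten_cons, List.append_assoc] at h
    rw [List.map_cons, List.foldl_cons]
    show (t.map (fun r => (r.length : Int))).foldl (pvBSliceRow F)
        (acc ++ [PySem.List.slice F (some (p : Int)) (some ((p : Int) + (r.length : Int)))],
         (p : Int) + (r.length : Int)) = _
    rw [pv_slice_row F r (t.flatten ++ rest) p h]
    have hdrop : F.drop (p + r.length) = t.flatten ++ rest := by
      rw [← List.drop_drop, h]; simp
    have hcast : (p : Int) + (r.length : Int) = ((p + r.length : Nat) : Int) := by push_cast; ring
    rw [hcast, ih (p + r.length) (acc ++ [r]) rest hdrop]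
    simp only [List.flatten_cons, List.length_append, List.append_assoc,
      List.singleton_append, Prod.mk.injEq]
    exact ⟨trivial, by congr 1; omega⟩

theorem pv_b3_cube (F : List Int) (C : List (List (List Int))) :
    ∀ (p : Nat) (acc : List (List (List Int))) (rest : List Int),
      F.drop p = C.flatten.flatten ++ rest →
      (C.map (fun pl => pl.map (fun r => (r.length : Int)))).foldl (pvBBuildPlane F)
          (acc, (p : Int))
        = (acc ++ C, ((p + C.flatten.flatten.length : Nat) : Int)) := by
  induction C with
  | nil => intro p acc rest h; simp
  | cons pl t ih =>
    intro p acc rest h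
    simp only [List.flatten_cons, List.flatten_append, List.append_assoc] at h
    rw [List.map_cons, List.foldl_cons]
    rw [show pvBBuildPlane F (acc, (p : Int)) (pl.map (fun r => (r.length : Int)))
          = (acc ++ [pl], ((p + pl.flatten.length : Nat) : Int)) by
        unfold pvBBuildPlane
        rw [pv_b3_plane F pl p [] (t.flatten.flatten ++ rest) h]; simp]
    have hdrop : F.drop (p + pl.flatten.length) = t.flatten.flatten ++ rest := by
      rw [← List.drop_drop, h]; simp
    rw [ih (p + pl.flatten.length) (acc ++ [pl]) rest hdrop]
    simp only [List.flatten_cons, List.flatten_append, List.length_append,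
      List.append_assoc, List.singleton_append, Prod.mk.injEq]
    exact ⟨trivial, by congr 1; omega⟩

theorem pv_b3_data (F : List Int) (D : List (List (List (List Int)))) :
    ∀ (p : Nat) (acc : List (List (List (List Int)))) (rest : List Int),
      F.drop p = D.flatten.flatten.flatten ++ rest →
      (D.map (fun cube => cube.map (fun pl => pl.map (fun r => (r.length : Int))))).foldl
          (pvBBuildCube F) (acc, (p : Int))
        = (acc ++ D, ((p + D.flatten.flatten.flatten.length : Nat) : Int)) := by
  induction D with
  | nil => intro p acc rest h; simp
  | cons c t ih =>
    intro p acc rest h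
    simp only [List.flatten_cons, List.flatten_append, List.append_assoc] at h
    rw [List.map_cons, List.foldl_cons]
    rw [show pvBBuildCube F (acc, (p : Int))
            (c.map (fun pl => pl.map (fun r => (r.length : Int))))
          = (acc ++ [c], ((p + c.flatten.flatten.length : Nat) : Int)) by
        unfold pvBBuildCube
        rw [pv_b3_cube F c p [] (t.flatten.flatten.flatten ++ rest) h]; simp]
    have hdrop : F.drop (p + c.flatten.flatten.length) = t.flatten.flatten.flatten ++ rest := by
      rw [← List.drop_drop, h]; simp
    rw [ih (p + c.flatten.flatten.length) (acc ++ [c]) rest hdrop]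
    simp only [List.flatten_cons, List.flatten_append, List.length_append,
      List.append_assoc, List.singleton_append, Prod.mk.injEq]
    exact ⟨trivial, by congr 1; omega⟩

-- B computes the same 4-level map.
theorem pv_B_map (data : List (List (List (List Int)))) :
    transfer_65536_alt data
      = data.map (fun c => c.map (fun p => p.map (fun r => r.map pvFix))) := by
  unfold transfer_65536_alt
  rw [pv_b1_data data [] []]
  simp only [List.nil_append]
  set D' := data.map (fun c => c.map (fun p => p.map (fun r => r.map pvFix))) with hD'
  have hflat : data.flatten.flatten.flatten.map pvFix = D'.flatten.flatten.flatten := by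
    simp [hD', List.map_flatten]
  have hshape : data.map (fun cube => cube.map (fun plane =>
        plane.map (fun row => (row.length : Int))))
      = D'.map (fun cube => cube.map (fun pl => pl.map (fun r => (r.length : Int)))) := by
    simp [hD', Function.comp]
  have hfix : (fun x : Int => if x > 32768 then x - 65536 else x) = pvFix := by
    funext x; rfl
  rw [hfix, hflat, hshape]
  have h0 : D'.flatten.flatten.flatten.drop 0 = D'.flatten.flatten.flatten ++ [] := by simp
  have hmain := pv_b3_data D'.flatten.flatten.flatten D' 0 [] [] h0
  rw [show ((0 : Nat) : Int) = (0 : Int) by norm_num] at hmain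
  rw [hmain]
  simp

-- ===== VERDICT (by name: the statement is the Claim_ definition above) =====
theorem transfer_65536_spec : Claim_equal_transfer_65536 := by
  unfold Claim_equal_transfer_65536
  intro data _
  unfold Spec_transfer_65536
  rw [pv_A_map, pv_B_map]
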